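-- pv_equiv track=rewrite | github.com/Mat-gyver/trotanalyser | trotanalyser-app/backend/api.py | base_score_musique
-- ===== SOURCE A (Python) =====
-- def base_score_musique(musique):
--     if not musique:
--         return 0
--
--     total = 0
--
--     for char in str(musique)[:8]:
--         if char == "1":
--             total += 10
--         elif char == "2":
--             total += 8
--         elif char == "3":
--             total += 6
--         elif char == "4":
--             total += 4
--         elif char == "5":
--             total += 2
--         elif char.lower() == "d":
--             total -= 5
--
--     return max(0, total)
-- ===== SOURCE B (Python) =====
-- def base_score_musique(musique):
--     if not musique:
--         return 0
--     s = str(musique)[:8]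
--     total = (10 * s.count("1") + 8 * s.count("2") + 6 * s.count("3")
--              + 4 * s.count("4") + 2 * s.count("5")
--              - 5 * (s.count("d") + s.count("D")))
--     return max(0, total)
-- ===== Notes on version B (the rewrite author's own statement) =====
-- stated objective: idiomatic
-- what changed: Replaces the per-character branch-dispatch loop with a single closed weighted sum over fixed character counts of the 8-char prefix (case-sensitive digits, both 'd' and 'D' weighted -5).
import Mathlib
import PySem

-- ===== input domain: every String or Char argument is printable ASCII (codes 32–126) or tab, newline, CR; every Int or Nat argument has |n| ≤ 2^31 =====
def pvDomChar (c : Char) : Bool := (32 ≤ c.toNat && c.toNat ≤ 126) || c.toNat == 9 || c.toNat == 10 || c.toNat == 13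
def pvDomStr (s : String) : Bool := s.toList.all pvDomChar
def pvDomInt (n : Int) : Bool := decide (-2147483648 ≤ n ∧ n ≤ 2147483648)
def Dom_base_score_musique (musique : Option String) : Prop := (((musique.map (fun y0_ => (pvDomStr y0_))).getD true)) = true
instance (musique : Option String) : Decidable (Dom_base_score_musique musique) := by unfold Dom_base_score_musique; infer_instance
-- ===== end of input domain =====

-- B replaces A's per-character branch-dispatch loop by a closed weighted sum over fixed character counts (idiomatic; same cost).


-- ===== PORT A =====
def base_score_musique (musique : Option String) : Int :=
  match musique with
  | none => 0
  | some s =>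
    if s = "" then 0
    else
      -- for char in str(musique)[:8]: branch dispatch accumulating total
      let total := (PySem.List.slice s.toList none (some 8)).foldl
        (fun total char =>
          if char = '1' then total + 10
          else if char = '2' then total + 8
          else if char = '3' then total + 6
          else if char = '4' then total + 4
          else if char = '5' then total + 2
          -- char.lower() == "d": exact for a single char via lowerChar
          else if PySem.Chars.lowerChar char = 'd' then total - 5
          else total) (0 : Int)
      max 0 total

-- ===== PORT B =====
def base_score_musique_alt (musique : Option String) : Int :=
  match musique with
  | none => 0
  | some str =>
    if str = "" then 0
    else
      -- s = str(musique)[:8]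
      let s := PySem.List.slice str.toList none (some 8)
      -- s.count("x") for a single-char needle = PySem.List.count over the chars
      let total : Int := 10 * (PySem.List.count s '1' : Int) + 8 * (PySem.List.count s '2' : Int)
        + 6 * (PySem.List.count s '3' : Int) + 4 * (PySem.List.count s '4' : Int)
        + 2 * (PySem.List.count s '5' : Int)
        - 5 * ((PySem.List.count s 'd' : Int) + (PySem.List.count s 'D' : Int))
      max 0 total

-- ===== PRECONDITION & SPEC =====
def Spec_base_score_musique (musique : Option String) (out : Int) : Prop := out = base_score_musique_alt musique
instance (musique : Option String) (out : Int) : Decidable (Spec_base_score_musique musique out) := by unfold Spec_base_score_musique; infer_instance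

-- ===== CLAIM (what is proved, stated in full; the proofs are below) =====
def Claim_equal_base_score_musique : Prop := ∀ (musique : Option String), Dom_base_score_musique musique → Spec_base_score_musique musique (base_score_musique musique)

-- ===== LEMMAS AND PROOFS =====

theorem lowerChar_eq_d_iff (c : Char) : (PySem.Chars.lowerChar c = 'd') ↔ (c = 'd' ∨ c = 'D') := by
  unfold PySem.Chars.lowerChar PySem.Chars.isupper
  split
  · next h =>
    rw [Bool.and_eq_true, decide_eq_true_eq, decide_eq_true_eq] at h
    obtain ⟨h1, h2⟩ := h
    rw [Char.le_def, UInt32.le_iff_toNat_le] at h1 h2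
    have hb : 65 ≤ c.toNat ∧ c.toNat ≤ 90 := by
      constructor
      · simpa using h1
      · simpa using h2
    constructor
    · intro he
      have ht : (Char.ofNat (c.toNat + 32)).toNat = 100 := by rw [he]; rfl
      rw [Char.toNat_ofNat, if_pos (by left; omega : (c.toNat + 32).isValidChar)] at ht
      right
      have hD : c.toNat = ('D' : Char).toNat := by
        have : ('D' : Char).toNat = 68 := rfl
        omega
      exact Char.ext (UInt32.toNat_inj.mp hD)
    · rintro (rfl | rfl)
      · exfalso; have h100 : ('d' : Char).toNat = 100 := rfl; omega
      · rfl
  · next h =>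
    constructor
    · exact Or.inl
    · rintro (rfl | rfl)
      · rfl
      · exact absurd (by decide) h

-- A's accumulating loop equals B's weighted count sum, for any start value.
theorem foldl_dispatch_eq_counts (l : List Char) (t : Int) :
    l.foldl (fun total char =>
          if char = '1' then total + 10
          else if char = '2' then total + 8
          else if char = '3' then total + 6
          else if char = '4' then total + 4
          else if char = '5' then total + 2
          else if PySem.Chars.lowerChar char = 'd' then total - 5
          else total) t
    = t + 10 * (PySem.List.count l '1' : Int) + 8 * (PySem.List.count l '2' : Int)
        + 6 * (PySem.List.count l '3' : Int) + 4 * (PySem.List.count l '4' : Int)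
        + 2 * (PySem.List.count l '5' : Int)
        - 5 * ((PySem.List.count l 'd' : Int) + (PySem.List.count l 'D' : Int)) := by
  induction l generalizing t with
  | nil => simp [PySem.List.count]
  | cons c l ih =>
    simp only [List.foldl_cons, ih, PySem.List.count, List.count_cons]
    by_cases h1 : c = '1'
    · subst h1; simp; ring
    · by_cases h2 : c = '2'
      · subst h2; simp; ring
      · by_cases h3 : c = '3'
        · subst h3; simp; ring
        · by_cases h4 : c = '4'
          · subst h4; simp; ring
          · by_cases h5 : c = '5'
            · subst h5; simp; ring
            · by_cases hd : PySem.Chars.lowerChar c = 'd'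
              · rcases (lowerChar_eq_d_iff c).mp hd with rfl | rfl
                · simp [hd]; ring
                · simp [hd]; ring
              · have hcd : c ≠ 'd' := fun h => hd ((lowerChar_eq_d_iff c).mpr (Or.inl h))
                have hcD : c ≠ 'D' := fun h => hd ((lowerChar_eq_d_iff c).mpr (Or.inr h))
                simp [h1, h2, h3, h4, h5, hd, hcd, hcD]

-- ===== VERDICT (by name: the statement is the Claim_ definition above) =====
theorem base_score_musique_spec : Claim_equal_base_score_musique := by
  intro musique _
  unfold Spec_base_score_musique base_score_musique base_score_musique_alt
  cases musique with
  | none => rfl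
  | some s =>
    by_cases hs : s = ""
    · simp [hs]
    · simp only [hs, if_false]
      rw [foldl_dispatch_eq_counts]
      ring_nf
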